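-- pv_equiv track=rewrite | github.com/hot9cups/uhh-stuff | Genome Sequencing (Bioinformatics II)/week1/OverlapGraph.py | getOverlapGraph
-- ===== SOURCE A (Python) =====
-- def getOverlapGraph(kmers):
--     prefix = {}
--     for kmer in kmers:
--         prefix.setdefault(kmer[:-1], []).append(kmer)
--     overlapGraph = {}
--
--     for kmer in kmers:
--         suffix = kmer[1:]
--         if suffix in prefix:
--             overlapGraph.setdefault(kmer, []).extend(prefix.get(suffix))
--     return overlapGraph
-- ===== SOURCE B (Python) =====
-- def getOverlapGraph(kmers):
--     overlapGraph = {}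
--     for kmer in kmers:
--         suffix = kmer[1:]
--         for other in kmers:
--             if suffix == other[:-1]:
--                 overlapGraph.setdefault(kmer, []).append(other)
--     return overlapGraph
-- ===== Notes on version B (the rewrite author's own statement) =====
-- stated objective: simpler
-- what changed: B drops A's precomputed prefix-index dictionary and its membership test, using a plain nested loop that compares each kmer's suffix against every kmer's prefix directly and appends matches one by one.
import Mathlib
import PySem

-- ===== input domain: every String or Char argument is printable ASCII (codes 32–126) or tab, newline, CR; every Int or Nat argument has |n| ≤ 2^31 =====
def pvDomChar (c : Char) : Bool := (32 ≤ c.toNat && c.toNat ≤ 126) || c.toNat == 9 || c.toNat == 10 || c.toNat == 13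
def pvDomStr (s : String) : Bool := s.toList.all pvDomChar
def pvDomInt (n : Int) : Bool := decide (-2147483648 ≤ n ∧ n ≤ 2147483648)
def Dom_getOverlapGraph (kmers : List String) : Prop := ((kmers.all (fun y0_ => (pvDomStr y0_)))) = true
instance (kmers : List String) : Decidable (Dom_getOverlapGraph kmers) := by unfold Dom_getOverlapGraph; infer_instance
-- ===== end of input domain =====

-- B replaces A's prefix-index dictionary with the plain quadratic double loop
-- (for each kmer, scan all kmers for a suffix/prefix overlap): simpler, no index, same return value.

-- shared slice helpers: kmer[:-1] and kmer[1:]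
def kPrefix (s : String) : String := PySem.Str.slice s none (some (-1))
def kSuffix (s : String) : String := PySem.Str.slice s (some 1) none

-- ===== PORT A =====
-- prefix = {}; for kmer: prefix.setdefault(kmer[:-1], []).append(kmer)  — setdefault+append is Dict.modify
-- then: for kmer: if kmer[1:] in prefix: overlapGraph.setdefault(kmer, []).extend(prefix.get(kmer[1:]))
def getOverlapGraph (kmers : List String) : List (String × List String) :=
  let prefixD := kmers.foldl
    (fun d kmer => d.modify (kPrefix kmer) [] (fun v => v ++ [kmer])) PySem.Dict.empty
  let overlapGraph := kmers.foldl
    (fun g kmer =>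
      let suffix := kSuffix kmer
      if prefixD.contains suffix then
        g.modify kmer [] (fun v => v ++ prefixD.getD suffix [])
      else g)
    PySem.Dict.empty
  overlapGraph.items

-- ===== PORT B =====
-- naive double loop: for kmer: for other: if kmer[1:] == other[:-1]: overlapGraph.setdefault(kmer, []).append(other)
def getOverlapGraph_alt (kmers : List String) : List (String × List String) :=
  let overlapGraph := kmers.foldl
    (fun g kmer =>
      let suffix := kSuffix kmer
      kmers.foldl
        (fun g2 other =>
          if suffix == kPrefix other then g2.modify kmer [] (fun v => v ++ [other]) else g2)
        g)
    PySem.Dict.empty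
  overlapGraph.items

-- ===== PRECONDITION & SPEC =====
def Spec_getOverlapGraph (kmers : List String) (out : List (String × List String)) : Prop := out = getOverlapGraph_alt kmers
instance (kmers : List String) (out : List (String × List String)) : Decidable (Spec_getOverlapGraph kmers out) := by unfold Spec_getOverlapGraph; infer_instance

-- ===== CLAIM (what is proved, stated in full; the proofs are below) =====
def Claim_equal_getOverlapGraph : Prop := ∀ (kmers : List String), Dom_getOverlapGraph kmers → Spec_getOverlapGraph kmers (getOverlapGraph kmers)

-- ===== LEMMAS AND PROOFS =====

-- two successive setdefault-and-extend mutations of the same key fuse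
lemma modify_comp (d : PySem.Dict String (List String)) (k : String)
    (f h : List String → List String) :
    (d.modify k [] f).modify k [] h = d.modify k [] (fun v => h (f v)) := by
  simp [PySem.Dict.modify.eq_1, PySem.Dict.getD_insert_self, PySem.Dict.insert_insert_self]

-- B's inner loop over one fixed kmer collapses to a single conditional extend by the filtered list
lemma inner_fold_eq (k : String) (p : String → Bool) (l : List String)
    (g : PySem.Dict String (List String)) :
    l.foldl (fun g2 o => if p o then g2.modify k [] (fun v => v ++ [o]) else g2) g
      = if l.any p then g.modify k [] (fun v => v ++ l.filter p) else g := by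
  induction l generalizing g with
  | nil => simp
  | cons a l ih =>
    simp only [List.foldl_cons, List.any_cons, List.filter_cons]
    by_cases hp : p a = true
    · rw [hp, if_pos rfl, ih]
      by_cases ha : l.any p = true
      · simp only [ha, Bool.true_or, if_pos, modify_comp]
        congr 1
        funext v
        simp
      · have hfil : l.filter p = [] := by
          rw [List.filter_eq_nil_iff]
          simp only [List.any_eq_true] at ha
          push Not at ha
          exact ha
        simp [ha, hfil]
    · rw [if_neg hp, ih]
      simp [hp]

-- A's prefix dictionary: lookup is the filter of kmers whose kmer[:-1] equals the key
lemma prefix_getD (l : List String) (d : PySem.Dict String (List String)) (s : String) :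
    (l.foldl (fun d kmer => d.modify (kPrefix kmer) [] (fun v => v ++ [kmer])) d).getD s []
      = d.getD s [] ++ l.filter (fun o => kPrefix o == s) := by
  induction l generalizing d with
  | nil => simp
  | cons a l ih =>
    simp only [List.foldl_cons, List.filter_cons, ih]
    rw [PySem.Dict.getD_modify]
    by_cases h : s = kPrefix a
    · subst h
      simp
    · have hb : (kPrefix a == s) = false := beq_eq_false_iff_ne.2 (fun e => h e.symm)
      simp [h, hb]

-- A's prefix dictionary: membership is "some kmer has this prefix"
lemma prefix_contains (l : List String) (d : PySem.Dict String (List String)) (s : String) :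
    (l.foldl (fun d kmer => d.modify (kPrefix kmer) [] (fun v => v ++ [kmer])) d).contains s
      = (d.contains s || l.any (fun o => kPrefix o == s)) := by
  induction l generalizing d with
  | nil => simp
  | cons a l ih =>
    simp only [List.foldl_cons, List.any_cons, ih, PySem.Dict.contains_modify]
    rw [Bool.eq_iff_iff]
    simp only [Bool.or_eq_true, beq_iff_eq]
    constructor
    · rintro ((h | h) | h)
      · exact Or.inr (Or.inl h.symm)
      · exact Or.inl h
      · exact Or.inr (Or.inr h)
    · rintro (h | h | h)
      · exact Or.inl (Or.inr h)
      · exact Or.inl (Or.inl h.symm)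
      · exact Or.inr h

-- one outer step of A (conditional extend by the prefix-index lookup) equals one outer step of B (the inner scan)
lemma step_eq (kmers : List String) (g : PySem.Dict String (List String)) (kmer : String) :
    (if (kmers.foldl (fun d km => d.modify (kPrefix km) [] (fun v => v ++ [km])) PySem.Dict.empty).contains (kSuffix kmer) then
       g.modify kmer [] (fun v => v ++ (kmers.foldl (fun d km => d.modify (kPrefix km) [] (fun v => v ++ [km])) PySem.Dict.empty).getD (kSuffix kmer) [])
     else g)
      = kmers.foldl (fun g2 other => if kSuffix kmer == kPrefix other then g2.modify kmer [] (fun v => v ++ [other]) else g2) g := by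
  rw [inner_fold_eq, prefix_contains, prefix_getD]
  simp only [PySem.Dict.contains_empty, PySem.Dict.getD_empty, Bool.false_or, List.nil_append]
  have hps : (fun o => kSuffix kmer == kPrefix o) = (fun o => kPrefix o == kSuffix kmer) := by
    funext o; rw [Bool.eq_iff_iff]; simp only [beq_iff_eq]; exact eq_comm
  rw [hps]

-- ===== VERDICT (by name: the statement is the Claim_ definition above) =====
theorem getOverlapGraph_spec : Claim_equal_getOverlapGraph := by
  intro kmers _
  show getOverlapGraph kmers = getOverlapGraph_alt kmers
  exact congrArg PySem.Dict.items
    (List.foldl_ext _ _ _ (fun g kmer _ => step_eq kmers g kmer))
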